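-- pv_equiv track=rewrite | github.com/ferpoble2/Relief_Creator | src/output/shapefile_exporter.py | __delete_z_axis
-- ===== SOURCE A (Python) =====
-- def __delete_z_axis(list_of_points: list) -> list:
--     """
--     Delete the third component of a list of points, returning a list only with the first two components of
--     each point.
--
--     input: [a.x,a.y,a.z,b.x,b.y,b.z,c.x,...]
--     output: [[a.x,a.y],[b.x,b.y],[c.x,...]
--
--     Args:
--         list_of_points: List of points to use
--
--     Returns: List with the points without the third component
--     """
--     new_list = []
--     pair_used = []
--     for component_ind in range(len(list_of_points)):
--         if component_ind % 3 == 0: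
--             pair_used.append(list_of_points[component_ind])
--         elif component_ind % 3 == 1:
--             pair_used.append(list_of_points[component_ind])
--         elif component_ind % 3 == 2:
--             new_list.append(pair_used)
--             pair_used = []
--     return new_list
-- ===== SOURCE B (Python) =====
-- def __delete_z_axis(list_of_points: list) -> list:
--     xs = list_of_points[0::3]
--     ys = list_of_points[1::3]
--     zs = list_of_points[2::3]
--     return [[x, y] for x, y, _ in zip(xs, ys, zs)]
-- ===== Notes on version B (the rewrite author's own statement) =====
-- stated objective: idiomatic
-- what changed: Replaces the per-index modulo-3 state machine with accumulator buffer by three strided slices zipped together (zip drops the incomplete trailing triple exactly as A does).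
import Mathlib
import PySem

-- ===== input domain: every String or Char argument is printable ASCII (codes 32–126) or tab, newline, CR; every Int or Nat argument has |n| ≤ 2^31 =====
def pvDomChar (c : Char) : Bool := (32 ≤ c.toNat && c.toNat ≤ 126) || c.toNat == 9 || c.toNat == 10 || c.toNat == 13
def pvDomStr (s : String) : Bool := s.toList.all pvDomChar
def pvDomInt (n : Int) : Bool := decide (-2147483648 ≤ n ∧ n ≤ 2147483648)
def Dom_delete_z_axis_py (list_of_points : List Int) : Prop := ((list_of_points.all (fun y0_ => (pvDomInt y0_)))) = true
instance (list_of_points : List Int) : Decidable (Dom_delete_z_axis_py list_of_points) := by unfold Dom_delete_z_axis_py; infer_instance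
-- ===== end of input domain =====

-- B replaces A's per-index modulo-3 state machine by three strided slices zipped into pairs (same O(n) cost, idiomatic decomposition).


-- ===== PORT A =====
-- A builds each pair in a mutable buffer, flushing it on every third index (i % 3 == 2).
def delete_z_axis_py (list_of_points : List Int) : List (List Int) :=
  ((PySem.List.pyRange 0 (list_of_points.length : Int) 1).foldl
    (fun (st : List (List Int) × List Int) component_ind =>
      if PySem.Int.mod component_ind 3 = 0 then
        (st.1, st.2 ++ [PySem.List.pyGetD list_of_points component_ind 0])
      else if PySem.Int.mod component_ind 3 = 1 then
        (st.1, st.2 ++ [PySem.List.pyGetD list_of_points component_ind 0])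
      else if PySem.Int.mod component_ind 3 = 2 then
        (st.1 ++ [st.2], [])
      else st)
    ([], [])).1

-- ===== PORT B =====
-- hand port of the step-3 slice xs[s::3] for s = 0,1,2 (exact for nonnegative start, step 3):
-- stride3 l = l[0::3]; l[s::3] = stride3 (l.drop s).
def stride3 : List Int → List Int
  | [] => []
  | a :: rest => a :: stride3 (rest.drop 2)
termination_by l => l.length
decreasing_by simp

def delete_z_axis_py_alt (list_of_points : List Int) : List (List Int) :=
  let xs := stride3 list_of_points
  let ys := stride3 (list_of_points.drop 1)
  let zs := stride3 (list_of_points.drop 2)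
  (List.zip xs (List.zip ys zs)).map (fun p => [p.1, p.2.1])

-- ===== PRECONDITION & SPEC =====
def Spec_delete_z_axis_py (list_of_points : List Int) (out : List (List Int)) : Prop := out = delete_z_axis_py_alt list_of_points
instance (list_of_points : List Int) (out : List (List Int)) : Decidable (Spec_delete_z_axis_py list_of_points out) := by unfold Spec_delete_z_axis_py; infer_instance

-- ===== CLAIM (what is proved, stated in full; the proofs are below) =====
def Claim_equal_delete_z_axis_py : Prop := ∀ (list_of_points : List Int), Dom_delete_z_axis_py list_of_points → Spec_delete_z_axis_py list_of_points (delete_z_axis_py list_of_points)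

-- ===== LEMMAS AND PROOFS =====

-- The loop body of port A, factored out for the proofs (definitionally equal to the inline lambda).
def aStep (st : List (List Int) × List Int) (i : Int) (x : Int) : List (List Int) × List Int :=
  if PySem.Int.mod i 3 = 0 then (st.1, st.2 ++ [x])
  else if PySem.Int.mod i 3 = 1 then (st.1, st.2 ++ [x])
  else if PySem.Int.mod i 3 = 2 then (st.1 ++ [st.2], [])
  else st

lemma delete_z_axis_py_eq_aStep (l : List Int) :
    delete_z_axis_py l =
      ((PySem.List.pyRange 0 (l.length : Int) 1).foldl
        (fun st i => aStep st i (PySem.List.pyGetD l i 0)) ([], [])).1 := rfl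

-- An index loop 'for i in range(j, len(l)): f(i, l[i])' is a fold over enumerate of the suffix.
lemma foldl_pyRange_enum {σ : Type} (l : List Int) (f : σ → Int → Int → σ) :
    ∀ (s : List Int) (j : Nat) (init : σ), s = l.drop j →
      (PySem.List.pyRange (j : Int) (l.length : Int) 1).foldl
          (fun acc i => f acc i (PySem.List.pyGetD l i 0)) init
        = (PySem.List.enumerate s (j : Int)).foldl (fun acc p => f acc p.1 p.2) init := by
  intro s
  induction s with
  | nil =>
    intro j init h
    have hj : (l.length : Int) ≤ (j : Nat) := by
      have := congrArg List.length h
      simp [List.length_drop] at this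
      omega
    rw [PySem.List.pyRange_one_eq_nil hj]
    simp [PySem.List.enumerate]
  | cons x s' ih =>
    intro j init h
    have hj : j < l.length := by
      by_contra hc
      rw [List.drop_eq_nil_of_le (by omega)] at h
      simp at h
    have hx : l[j]'hj = x := by
      have h2 : some x = l[j]? := by
        have := congrArg (fun t => t.head?) h
        simpa [List.head?_drop] using this
      rw [List.getElem?_eq_getElem hj] at h2
      exact (Option.some.inj h2).symm
    have hget : PySem.List.pyGetD l (j : Int) 0 = x := by
      rw [PySem.List.pyGetD_natCast]
      simp [List.getD, hj, hx]
    rw [PySem.List.pyRange_one_cons (by exact_mod_cast hj)]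
    rw [PySem.List.enumerate_cons]
    simp only [List.foldl_cons, hget]
    have hrec := ih (j + 1) (f init (j : Int) x) (by rw [← List.drop_drop, ← h]; rfl)
    have hcast : ((j : Int) + 1) = ((j + 1 : Nat) : Int) := by push_cast; ring
    rw [hcast, hrec]

lemma alt_nil : delete_z_axis_py_alt [] = [] := by
  simp [delete_z_axis_py_alt, stride3]

lemma alt_one (a : Int) : delete_z_axis_py_alt [a] = [] := by
  simp [delete_z_axis_py_alt, stride3]

lemma alt_two (a b : Int) : delete_z_axis_py_alt [a, b] = [] := by
  simp [delete_z_axis_py_alt, stride3]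

lemma alt_cons3 (a b c : Int) (rest : List Int) :
    delete_z_axis_py_alt (a :: b :: c :: rest) = [a, b] :: delete_z_axis_py_alt rest := by
  simp [delete_z_axis_py_alt, stride3]

-- The loop invariant: starting at an index divisible by 3 with an empty pair buffer and accumulator
-- acc, the fold over the remaining components appends exactly B's answer for the suffix.
lemma loop_tri : ∀ (n : Nat) (s : List Int), s.length ≤ n → ∀ (k : Int) (acc : List (List Int)),
    ((PySem.List.enumerate s (3 * k)).foldl (fun st (p : Int × Int) => aStep st p.1 p.2)
        (acc, [])).1 = acc ++ delete_z_axis_py_alt s := by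
  intro n
  induction n with
  | zero =>
    intro s hs k acc
    have : s = [] := List.length_eq_zero_iff.mp (by omega)
    subst this
    simp [PySem.List.enumerate, alt_nil]
  | succ m ih =>
    intro s hs k acc
    match s with
    | [] => simp [PySem.List.enumerate, alt_nil]
    | [a] =>
      simp [PySem.List.enumerate, aStep, alt_one]
    | [a, b] =>
      simp [PySem.List.enumerate, aStep, alt_two]
    | a :: b :: c :: rest =>
      simp only [PySem.List.enumerate_cons, List.foldl_cons]
      have stepEval :
          aStep (aStep (aStep (acc, []) (3 * k) a) (3 * k + 1) b) (3 * k + 1 + 1) c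
            = (acc ++ [[a, b]], []) := by
        simp [aStep]
        split_ifs <;> first | rfl | omega
      rw [show (3 * k) = 3 * k + 0 by ring] at stepEval ⊢
      rw [stepEval]
      have hk : (3 * k + 0 + 1 + 1 + 1) = 3 * (k + 1) := by ring
      rw [hk]
      rw [ih rest (by simp at hs; omega) (k + 1) (acc ++ [[a, b]])]
      rw [alt_cons3]
      simp

-- ===== VERDICT (by name: the statement is the Claim_ definition above) =====
theorem delete_z_axis_py_spec : Claim_equal_delete_z_axis_py := by
  intro l _
  unfold Spec_delete_z_axis_py
  rw [delete_z_axis_py_eq_aStep]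
  have H := foldl_pyRange_enum l aStep l 0 ([], []) (by simp)
  norm_num at H
  rw [H]
  have T := loop_tri l.length l (le_refl _) 0 []
  norm_num at T
  exact T
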